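-- pv_equiv track=rewrite | github.com/zhaofei0923/bid_agent | backend/app/services/document_processing/bid_document_parser.py | _find_page_number
-- ===== SOURCE A (Python) =====
-- def _find_page_number(
--     char_offset: int,
--     page_texts: list[str] | None,
-- ) -> int:
--     """Map a character offset to a 1-based page number."""
--     if not page_texts:
--         return 1
--
--     current_offset = 0
--     for i, page_text in enumerate(page_texts):
--         current_offset += len(page_text)
--         if current_offset >= char_offset:
--             return i + 1
--
--     return len(page_texts)
-- ===== SOURCE B (Python) =====
-- def _find_page_number(
--     char_offset: int,
--     page_texts: list[str] | None,
-- ) -> int: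
--     """Map a character offset to a 1-based page number."""
--     if not page_texts:
--         return 1
--
--     prefix = []
--     total = 0
--     for page_text in page_texts:
--         total += len(page_text)
--         prefix.append(total)
--
--     # bisect_left: first index whose cumulative length is >= char_offset
--     lo, hi = 0, len(prefix)
--     while lo < hi:
--         mid = (lo + hi) // 2
--         if prefix[mid] < char_offset:
--             lo = mid + 1
--         else:
--             hi = mid
--
--     return lo + 1 if lo < len(page_texts) else len(page_texts)
-- ===== Notes on version B (the rewrite author's own statement) =====
-- stated objective: alternative
-- what changed: B builds the cumulative page-length prefix array once and locates the target page with a hand-written bisect_left binary search, instead of A's single linear scan with a running accumulator and early return.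
import Mathlib
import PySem

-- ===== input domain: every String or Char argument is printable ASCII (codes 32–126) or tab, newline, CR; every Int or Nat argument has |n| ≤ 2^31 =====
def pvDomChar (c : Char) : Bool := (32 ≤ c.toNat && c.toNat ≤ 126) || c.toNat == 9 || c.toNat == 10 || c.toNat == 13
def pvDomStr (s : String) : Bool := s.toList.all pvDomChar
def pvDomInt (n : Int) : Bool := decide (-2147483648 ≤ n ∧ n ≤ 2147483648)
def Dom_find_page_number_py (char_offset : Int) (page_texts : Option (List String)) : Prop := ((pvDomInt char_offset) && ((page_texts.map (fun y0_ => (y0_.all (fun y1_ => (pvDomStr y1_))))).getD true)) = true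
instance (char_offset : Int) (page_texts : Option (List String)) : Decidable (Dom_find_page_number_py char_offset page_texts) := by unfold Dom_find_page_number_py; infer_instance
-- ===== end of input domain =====

-- ===== PORT A =====

-- B replaces A's linear accumulator scan with a pfx-sum array plus a hand-written
-- bisect_left binary search (alternative decomposition, same O(n) total cost).

-- ===== PORT A =====
-- A's loop: running offset; return 1-based index of first page whose cumulative
-- length reaches char_offset, else the page count.
def pvAGo (char_offset : Int) (n : Int) : Int → Int → List String → Int
  | _, _, [] => n
  | current_offset, i, page_text :: rest =>
      let current_offset' := current_offset + PySem.Str.len page_text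
      if current_offset' ≥ char_offset then i + 1
      else pvAGo char_offset n current_offset' (i + 1) rest

def find_page_number_py (char_offset : Int) (page_texts : Option (List String)) : Int :=
  match page_texts with
  | none => 1
  | some ts =>
      if ts.isEmpty then 1
      else pvAGo char_offset (ts.length : Int) 0 0 ts

-- ===== PORT B =====
-- B's pfx array of cumulative page lengths.
def pvPrefix (total : Int) : List String → List Int
  | [] => []
  | page_text :: rest =>
      let total' := total + PySem.Str.len page_text
      total' :: pvPrefix total' rest

-- B's hand-written bisect_left loop (while lo < hi), fueled by hi - lo.
def pvBisect (pfx : List Int) (char_offset : Int) : Nat → Nat → Nat → Nat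
  | lo, _, 0 => lo
  | lo, hi, fuel + 1 =>
      if lo < hi then
        let mid := (lo + hi) / 2
        if pfx.getD mid 0 < char_offset then pvBisect pfx char_offset (mid + 1) hi fuel
        else pvBisect pfx char_offset lo mid fuel
      else lo

def find_page_number_py_alt (char_offset : Int) (page_texts : Option (List String)) : Int :=
  match page_texts with
  | none => 1
  | some ts =>
      if ts.isEmpty then 1
      else
        let pfx := pvPrefix 0 ts
        let lo := pvBisect pfx char_offset 0 pfx.length pfx.length
        if lo < ts.length then (lo : Int) + 1 else (ts.length : Int)

-- ===== PRECONDITION & SPEC =====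
def Spec_find_page_number_py (char_offset : Int) (page_texts : Option (List String)) (out : Int) : Prop := out = find_page_number_py_alt char_offset page_texts
instance (char_offset : Int) (page_texts : Option (List String)) (out : Int) : Decidable (Spec_find_page_number_py char_offset page_texts out) := by unfold Spec_find_page_number_py; infer_instance

-- ===== CLAIM (what is proved, stated in full; the proofs are below) =====
def Claim_equal_find_page_number_py : Prop := ∀ (char_offset : Int) (page_texts : Option (List String)), Dom_find_page_number_py char_offset page_texts → Spec_find_page_number_py char_offset page_texts (find_page_number_py char_offset page_texts)

-- ===== LEMMAS AND PROOFS =====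

-- Index of the first entry ≥ x in a list (length if none): the common spec of both ports.
def pvFirstGE (x : Int) : List Int → Nat
  | [] => 0
  | v :: rest => if x ≤ v then 0 else pvFirstGE x rest + 1

theorem pvPrefix_lb (ts : List String) (c : Int) (j : Nat)
    (hj : j < (pvPrefix c ts).length) : c ≤ (pvPrefix c ts).getD j 0 := by
  induction ts generalizing c j with
  | nil => simp [pvPrefix] at hj
  | cons t rest ih =>
      have hL : (0 : Int) ≤ PySem.Str.len t := by
        simp [PySem.Str.len]
      cases j with
      | zero => simpa [pvPrefix] using hL
      | succ j' =>
          have := ih (c + PySem.Str.len t) j' (by simpa [pvPrefix] using hj)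
          simp only [pvPrefix, List.getD_cons_succ]
          omega

theorem pvPrefix_mono (ts : List String) (c : Int) (j k : Nat) (hjk : j ≤ k)
    (hk : k < (pvPrefix c ts).length) :
    (pvPrefix c ts).getD j 0 ≤ (pvPrefix c ts).getD k 0 := by
  induction ts generalizing c j k with
  | nil => simp [pvPrefix] at hk
  | cons t rest ih =>
      cases j with
      | zero =>
          cases k with
          | zero => exact le_refl _
          | succ k' =>
              have := pvPrefix_lb rest (c + PySem.Str.len t) k' (by simpa [pvPrefix] using hk)
              simpa [pvPrefix] using this
      | succ j' =>
          cases k with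
          | zero => omega
          | succ k' =>
              have := ih (c + PySem.Str.len t) j' k' (by omega) (by simpa [pvPrefix] using hk)
              simpa [pvPrefix] using this

-- pvFirstGE from pointwise bounds: everything below lo is < x, everything from lo on is ≥ x.
theorem pvFirstGE_char (x : Int) (p : List Int) (lo : Nat) (hlo : lo ≤ p.length)
    (h1 : ∀ j, j < lo → p.getD j 0 < x)
    (h2 : ∀ j, lo ≤ j → j < p.length → x ≤ p.getD j 0) :
    pvFirstGE x p = lo := by
  induction p generalizing lo with
  | nil =>
      simp only [List.length_nil, Nat.le_zero] at hlo
      simp [pvFirstGE, hlo]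
  | cons v rest ih =>
      cases lo with
      | zero =>
          have := h2 0 (by omega) (by simp)
          simp only [pvFirstGE]
          simp only [List.getD_cons_zero] at this
          simp [this]
      | succ lo' =>
          have hv := h1 0 (by omega)
          simp only [List.getD_cons_zero] at hv
          have : pvFirstGE x rest = lo' := by
            apply ih lo' (by simpa using hlo)
            · intro j hj
              have := h1 (j + 1) (by omega)
              simpa using this
            · intro j hj hjl
              have := h2 (j + 1) (by omega) (by simpa using hjl)
              simpa using this
          simp only [pvFirstGE]
          rw [if_neg (by omega), this]

-- The bisect loop computes pvFirstGE on a monotone list, given the loop invariant.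
theorem pvBisect_eq (x : Int) (p : List Int)
    (hmono : ∀ j k, j ≤ k → k < p.length → p.getD j 0 ≤ p.getD k 0) :
    ∀ fuel lo hi, lo ≤ hi → hi ≤ p.length → hi - lo ≤ fuel →
    (∀ j, j < lo → p.getD j 0 < x) →
    (∀ j, hi ≤ j → j < p.length → x ≤ p.getD j 0) →
    pvBisect p x lo hi fuel = pvFirstGE x p := by
  intro fuel
  induction fuel with
  | zero =>
      intro lo hi h1 h2 h3 hlow hhigh
      have : lo = hi := by omega
      subst this
      exact (pvFirstGE_char x p lo (by omega) hlow (fun j hj hjl => hhigh j hj hjl)).symm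
  | succ fuel ih =>
      intro lo hi h1 h2 h3 hlow hhigh
      by_cases hcmp : lo < hi
      · have hmid1 : lo ≤ (lo + hi) / 2 := by omega
        have hmid2 : (lo + hi) / 2 < hi := by omega
        simp only [pvBisect, if_pos hcmp]
        by_cases hb : p.getD ((lo + hi) / 2) 0 < x
        · rw [if_pos hb]
          apply ih ((lo + hi) / 2 + 1) hi (by omega) h2 (by omega)
          · intro j hj
            rcases Nat.lt_or_ge j lo with h | h
            · exact hlow j h
            · exact lt_of_le_of_lt (hmono j ((lo + hi) / 2) (by omega) (by omega)) hb
          · exact hhigh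
        · rw [if_neg hb]
          apply ih lo ((lo + hi) / 2) (by omega) (by omega) (by omega) hlow
          intro j hj hjl
          exact le_trans (by omega) (hmono ((lo + hi) / 2) j hj hjl)
      · simp only [pvBisect, if_neg hcmp]
        have : lo = hi := by omega
        subst this
        exact (pvFirstGE_char x p lo (by omega) hlow (fun j hj hjl => hhigh j hj hjl)).symm

-- A's loop, characterised by pvFirstGE on the pfx array starting at accumulator c.
theorem pvAGo_eq (x n : Int) (ts : List String) : ∀ (c : Int) (i : Int),
    pvAGo x n c i ts =
      if pvFirstGE x (pvPrefix c ts) < ts.length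
      then i + (pvFirstGE x (pvPrefix c ts) : Int) + 1
      else n := by
  induction ts with
  | nil => intro c i; simp [pvAGo, pvPrefix, pvFirstGE]
  | cons t rest ih =>
      intro c i
      have e1 : pvAGo x n c i (t :: rest)
          = if c + PySem.Str.len t ≥ x then i + 1
            else pvAGo x n (c + PySem.Str.len t) (i + 1) rest := rfl
      have e2 : pvPrefix c (t :: rest)
          = (c + PySem.Str.len t) :: pvPrefix (c + PySem.Str.len t) rest := rfl
      rw [e1, e2]
      by_cases hx : x ≤ c + PySem.Str.len t
      · rw [if_pos (show c + PySem.Str.len t ≥ x by omega)]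
        simp only [pvFirstGE, if_pos hx, List.length_cons]
        rw [if_pos (by omega)]
        simp
      · rw [if_neg (show ¬ c + PySem.Str.len t ≥ x by omega)]
        simp only [pvFirstGE, if_neg hx, List.length_cons]
        rw [ih (c + PySem.Str.len t) (i + 1)]
        by_cases hlt : pvFirstGE x (pvPrefix (c + PySem.Str.len t) rest) < rest.length
        · rw [if_pos hlt, if_pos (by omega)]
          push_cast
          ring
        · rw [if_neg hlt, if_neg (by omega)]

-- ===== VERDICT (by name: the statement is the Claim_ definition above) =====
theorem find_page_number_py_spec : Claim_equal_find_page_number_py := by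
  intro char_offset page_texts _
  unfold Spec_find_page_number_py
  cases page_texts with
  | none => rfl
  | some ts =>
      by_cases hts : ts.isEmpty
      · simp [find_page_number_py, find_page_number_py_alt, hts]
      · simp only [find_page_number_py, find_page_number_py_alt, if_neg hts]
        have hb : pvBisect (pvPrefix 0 ts) char_offset 0 (pvPrefix 0 ts).length
              (pvPrefix 0 ts).length = pvFirstGE char_offset (pvPrefix 0 ts) := by
          apply pvBisect_eq char_offset (pvPrefix 0 ts)
            (fun j k hjk hk => pvPrefix_mono ts 0 j k hjk hk)
            (pvPrefix 0 ts).length 0 (pvPrefix 0 ts).length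
            (by omega) (by omega) (by omega) (by omega)
          intro j hj hjl; omega
        rw [hb, pvAGo_eq]
        split <;> simp
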